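-- pv_equiv track=rewrite | github.com/etwills/french_target | game/filter_words.py | filter_to_n_letters
-- ===== SOURCE A (Python) =====
-- def filter_to_n_letters(num_letters, word_list):
--     new_words = []
--     n_letters = []
--     for word in word_list:
--         if len(word) <= num_letters:
--             new_words.append(word)
--             if len(word) == num_letters:
--                 n_letters.append(word)
--
--     return [new_words, n_letters]
-- ===== SOURCE B (Python) =====
-- def filter_to_n_letters(num_letters, word_list):
--     new_words = [w for w in word_list if len(w) <= num_letters]
--     n_letters = [w for w in word_list if len(w) == num_letters]
--     return [new_words, n_letters]
-- ===== Notes on version B (the rewrite author's own statement) =====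
-- stated objective: idiomatic
-- what changed: Replaces the single fused loop with two nested appends by two independent filtering passes (list comprehensions), one per result list; order is preserved because each predicate is checked in input order and len(w)==n implies len(w)<=n.
import Mathlib
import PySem

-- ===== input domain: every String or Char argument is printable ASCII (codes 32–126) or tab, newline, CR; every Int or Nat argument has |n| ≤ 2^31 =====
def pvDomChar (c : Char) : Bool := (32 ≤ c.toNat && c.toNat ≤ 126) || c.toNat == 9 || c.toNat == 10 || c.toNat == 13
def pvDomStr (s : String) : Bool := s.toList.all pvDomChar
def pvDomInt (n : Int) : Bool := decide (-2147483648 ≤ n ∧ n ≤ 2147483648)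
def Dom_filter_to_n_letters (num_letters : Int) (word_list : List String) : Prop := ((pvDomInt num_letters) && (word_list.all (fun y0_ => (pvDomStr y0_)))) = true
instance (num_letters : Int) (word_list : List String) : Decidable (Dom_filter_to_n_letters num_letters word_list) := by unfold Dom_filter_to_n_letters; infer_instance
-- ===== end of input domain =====

-- B computes the two result lists by two independent filter passes instead of A's single fused loop (idiomatic decomposition; same cost).


-- ===== PORT A =====
def filter_to_n_letters (num_letters : Int) (word_list : List String) : List (List String) :=
  -- one fused loop: new_words/n_letters accumulated left-to-right, equality check nested
  let st := word_list.foldl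
    (fun (acc : List String × List String) word =>
      if PySem.Str.len word ≤ num_letters then
        (acc.1 ++ [word],
         if PySem.Str.len word = num_letters then acc.2 ++ [word] else acc.2)
      else acc)
    ([], [])
  [st.1, st.2]

-- ===== PORT B =====
def filter_to_n_letters_alt (num_letters : Int) (word_list : List String) : List (List String) :=
  [word_list.filter (fun w => decide (PySem.Str.len w ≤ num_letters)),
   word_list.filter (fun w => decide (PySem.Str.len w = num_letters))]

-- ===== PRECONDITION & SPEC =====
def Spec_filter_to_n_letters (num_letters : Int) (word_list : List String) (out : List (List String)) : Prop := out = filter_to_n_letters_alt num_letters word_list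
instance (num_letters : Int) (word_list : List String) (out : List (List String)) : Decidable (Spec_filter_to_n_letters num_letters word_list out) := by unfold Spec_filter_to_n_letters; infer_instance

-- ===== CLAIM (what is proved, stated in full; the proofs are below) =====
def Claim_equal_filter_to_n_letters : Prop := ∀ (num_letters : Int) (word_list : List String), Dom_filter_to_n_letters num_letters word_list → Spec_filter_to_n_letters num_letters word_list (filter_to_n_letters num_letters word_list)

-- ===== LEMMAS AND PROOFS =====

lemma filter_loop_eq (n : Int) (ws : List String) (a b : List String) :
    ws.foldl
      (fun (acc : List String × List String) word =>
        if PySem.Str.len word ≤ n then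
          (acc.1 ++ [word],
           if PySem.Str.len word = n then acc.2 ++ [word] else acc.2)
        else acc)
      (a, b)
    = (a ++ ws.filter (fun w => decide (PySem.Str.len w ≤ n)),
       b ++ ws.filter (fun w => decide (PySem.Str.len w = n))) := by
  induction ws generalizing a b with
  | nil => simp
  | cons w ws ih =>
    by_cases hle : PySem.Str.len w ≤ n
    · by_cases heq : PySem.Str.len w = n
      · rw [List.foldl_cons, if_pos hle, if_pos heq, ih, List.filter_cons, List.filter_cons,
            decide_eq_true hle, decide_eq_true heq]
        simp
      · rw [List.foldl_cons, if_pos hle, if_neg heq, ih, List.filter_cons, List.filter_cons,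
            decide_eq_true hle, decide_eq_false heq]
        simp
    · have heq : ¬ PySem.Str.len w = n := fun h => hle (le_of_eq h)
      rw [List.foldl_cons, if_neg hle, ih, List.filter_cons, List.filter_cons,
          decide_eq_false hle, decide_eq_false heq]
      simp

-- ===== VERDICT (by name: the statement is the Claim_ definition above) =====
theorem filter_to_n_letters_spec : Claim_equal_filter_to_n_letters := by
  intro n ws _
  unfold Spec_filter_to_n_letters filter_to_n_letters filter_to_n_letters_alt
  rw [filter_loop_eq]
  simp
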